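-- pv_equiv track=rewrite | github.com/alexspetty/nfield | tools/composite_gate.py | deranging_set
-- ===== SOURCE A (Python) =====
-- def gcd(a, b):
--     while b:
--         a, b = b, a % b
--     return a
--
-- def collision_count(n, g, base=10):
--     if g % n == 0:
--         return 0
--     count = 0
--     for r in range(1, n):
--         gr = (g * r) % n
--         if gr == 0:
--             continue
--         if (base * r) // n == (base * gr) // n:
--             count += 1
--     return count
--
-- def deranging_set(n, base=10):
--     deranging = []
--     for g in range(2, n):
--         if gcd(g, n) != 1:
--             continue
--         if collision_count(n, g, base) == 0:
--             deranging.append(g)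
--     return deranging
-- ===== SOURCE B (Python) =====
-- def _gcd(a, b):
--     return a if b == 0 else _gcd(b, a % b)
--
-- def deranging_set(n, base=10):
--     # Invert the loop nest: mark every multiplier g that has a bucket
--     # collision at some residue r, then keep the unmarked coprime g.
--     bad = set()
--     for r in range(1, n):
--         rb = (base * r) // n
--         for g in range(2, n):
--             gr = (g * r) % n
--             if gr != 0 and rb == (base * gr) // n:
--                 bad.add(g)
--     return [g for g in range(2, n) if _gcd(g, n) == 1 and g not in bad]
-- ===== Notes on version B (the rewrite author's own statement) =====
-- stated objective: alternative
-- what changed: B inverts the loop nest: one pass over residues r marks every multiplier g with a bucket collision into a set, then a single filter over the coprime candidates keeps the unmarked ones, instead of A's per-candidate counting pass.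
import Mathlib
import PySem

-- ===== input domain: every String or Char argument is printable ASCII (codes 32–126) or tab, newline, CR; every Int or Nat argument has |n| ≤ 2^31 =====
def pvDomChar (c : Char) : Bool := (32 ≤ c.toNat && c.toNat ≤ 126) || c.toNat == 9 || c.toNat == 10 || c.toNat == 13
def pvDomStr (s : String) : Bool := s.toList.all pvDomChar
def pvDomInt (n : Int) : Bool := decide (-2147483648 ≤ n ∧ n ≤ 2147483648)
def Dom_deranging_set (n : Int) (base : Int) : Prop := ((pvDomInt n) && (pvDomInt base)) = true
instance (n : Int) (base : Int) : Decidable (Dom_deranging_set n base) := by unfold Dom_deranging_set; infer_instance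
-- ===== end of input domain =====

-- B inverts A's loop nest (mark colliding multipliers in a set in one sweep over residues,
-- then filter the coprime candidates); alternative structure, no speed claim.

-- A's `gcd` (a while loop) and B's `_gcd` (direct recursion) are the same Euclidean
-- recursion; this one helper serves both ports.
def pyGcd (a b : Int) : Int :=
  if b = 0 then a else pyGcd b (PySem.Int.mod a b)
termination_by b.natAbs
decreasing_by
  rcases lt_trichotomy b 0 with hb | hb | hb
  · have h1 := PySem.Int.mod_neg_bounds a hb
    omega
  · omega
  · have h1 := PySem.Int.mod_nonneg a hb
    have h2 := PySem.Int.mod_lt a hb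
    omega

-- ===== PORT A =====
def collisionCount (n g base : Int) : Int :=
  if PySem.Int.mod g n = 0 then 0
  else
    (PySem.List.pyRange 1 n 1).foldl
      (fun (count : Int) r =>
        if PySem.Int.mod (g * r) n = 0 then count
        else if PySem.Int.floordiv (base * r) n
                = PySem.Int.floordiv (base * PySem.Int.mod (g * r) n) n then count + 1
        else count) 0

def deranging_set (n : Int) (base : Int) : List Int :=
  (PySem.List.pyRange 2 n 1).foldl
    (fun deranging g =>
      if pyGcd g n ≠ 1 then deranging
      else if collisionCount n g base = 0 then deranging ++ [g]
      else deranging) []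

-- ===== PORT B =====
def badSet (n base : Int) : PySem.Set Int :=
  (PySem.List.pyRange 1 n 1).foldl
    (fun bad r =>
      (PySem.List.pyRange 2 n 1).foldl
        (fun bad g =>
          if PySem.Int.mod (g * r) n ≠ 0 ∧
              PySem.Int.floordiv (base * r) n
                = PySem.Int.floordiv (base * PySem.Int.mod (g * r) n) n
          then PySem.Set.add bad g else bad)
        bad)
    PySem.Set.empty

def deranging_set_alt (n : Int) (base : Int) : List Int :=
  (PySem.List.pyRange 2 n 1).filter
    (fun g => pyGcd g n == 1 && !(PySem.Set.contains (badSet n base) g))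

-- ===== PRECONDITION & SPEC =====
def Spec_deranging_set (n : Int) (base : Int) (out : List Int) : Prop := out = deranging_set_alt n base
instance (n : Int) (base : Int) (out : List Int) : Decidable (Spec_deranging_set n base out) := by unfold Spec_deranging_set; infer_instance

-- ===== CLAIM (what is proved, stated in full; the proofs are below) =====
def Claim_equal_deranging_set : Prop := ∀ (n : Int) (base : Int), Dom_deranging_set n base → Spec_deranging_set n base (deranging_set n base)

-- ===== LEMMAS AND PROOFS =====

-- the collision condition shared by both programs
abbrev Collides (n base g r : Int) : Prop :=
  PySem.Int.mod (g * r) n ≠ 0 ∧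
    PySem.Int.floordiv (base * r) n = PySem.Int.floordiv (base * PySem.Int.mod (g * r) n) n

-- generic: membership through a fold whose step is characterised pointwise
theorem mem_foldl_of_step {α β : Type} (l : List β) (s : List α)
    (step : List α → β → List α) (φ : β → Prop) (y : α)
    (h : ∀ s b, b ∈ l → (y ∈ step s b ↔ y ∈ s ∨ φ b)) :
    y ∈ l.foldl step s ↔ y ∈ s ∨ ∃ b ∈ l, φ b := by
  induction l generalizing s with
  | nil => simp
  | cons x t ih =>
      simp only [List.foldl_cons, List.mem_cons]
      rw [ih _ (fun s b hb => h s b (List.mem_cons_of_mem x hb)),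
          h s x (List.mem_cons_self)]
      constructor
      · rintro ((hy | hy) | ⟨b, hb, hφ⟩)
        · exact Or.inl hy
        · exact Or.inr ⟨x, Or.inl rfl, hy⟩
        · exact Or.inr ⟨b, Or.inr hb, hφ⟩
      · rintro (hy | ⟨b, hb | hb, hφ⟩)
        · exact Or.inl (Or.inl hy)
        · exact Or.inl (Or.inr (hb ▸ hφ))
        · exact Or.inr ⟨b, hb, hφ⟩

theorem mem_badSet (n base g : Int) :
    g ∈ badSet n base ↔
      ∃ r ∈ PySem.List.pyRange 1 n 1, g ∈ PySem.List.pyRange 2 n 1 ∧ Collides n base g r := by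
  unfold badSet
  rw [mem_foldl_of_step _ _ _
      (fun r => g ∈ PySem.List.pyRange 2 n 1 ∧ Collides n base g r) g ?_]
  · simp [PySem.Set.empty]
  · intro s r _
    rw [PySem.List.foldl_ite_eq_foldl_filter
        (fun g' => PySem.Int.mod (g' * r) n ≠ 0 ∧
          PySem.Int.floordiv (base * r) n
            = PySem.Int.floordiv (base * PySem.Int.mod (g' * r) n) n)
        (fun bad g' => PySem.Set.add bad g')]
    rw [PySem.Set.mem_foldl_add (f := fun g' : Int => g')]
    apply or_congr_right
    constructor
    · rintro ⟨b, hb, rfl⟩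
      rw [List.mem_filter] at hb
      exact ⟨hb.1, of_decide_eq_true hb.2⟩
    · rintro ⟨h1, h2⟩
      exact ⟨g, List.mem_filter.2 ⟨h1, decide_eq_true h2⟩, rfl⟩

theorem collisionCount_eq_zero (n g base : Int) (hg : PySem.Int.mod g n ≠ 0) :
    (collisionCount n g base = 0 ↔
      ∀ r ∈ PySem.List.pyRange 1 n 1, ¬ Collides n base g r) := by
  unfold collisionCount
  rw [if_neg hg]
  have hc := PySem.List.foldl_congr_mem' (PySem.List.pyRange 1 n 1)
      (fun (count : Int) r =>
        if PySem.Int.mod (g * r) n = 0 then count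
        else if PySem.Int.floordiv (base * r) n
                = PySem.Int.floordiv (base * PySem.Int.mod (g * r) n) n then count + 1
        else count)
      (fun count r => if Collides n base g r then count + 1 else count) (0 : Int) ?_
  · rw [hc, PySem.List.foldl_ite_add_one]
    rw [zero_add]
    constructor
    · intro h r hr hcoll
      have := List.countP_eq_zero.1 (by exact_mod_cast h) r hr
      exact this (decide_eq_true hcoll)
    · intro h
      have : List.countP (fun x => decide (Collides n base g x)) (PySem.List.pyRange 1 n 1) = 0 :=
        List.countP_eq_zero.2 (fun r hr => by simp [h r hr])
      rw [this]; rfl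
  · intro r _ acc
    by_cases h1 : PySem.Int.mod (g * r) n = 0
    · simp [h1, Collides]
    · by_cases h2 : PySem.Int.floordiv (base * r) n
          = PySem.Int.floordiv (base * PySem.Int.mod (g * r) n) n
      · simp [h1, h2, Collides]
      · simp [h1, h2, Collides]

-- ===== VERDICT (by name: the statement is the Claim_ definition above) =====
theorem deranging_set_spec : Claim_equal_deranging_set := by
  intro n base _
  unfold Spec_deranging_set deranging_set deranging_set_alt
  have hc := PySem.List.foldl_congr_mem' (PySem.List.pyRange 2 n 1)
      (fun deranging g =>
        if pyGcd g n ≠ 1 then deranging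
        else if collisionCount n g base = 0 then deranging ++ [g]
        else deranging)
      (fun acc g => if pyGcd g n = 1 ∧ collisionCount n g base = 0 then acc ++ [g] else acc)
      [] ?_
  · rw [hc, PySem.List.foldl_append_ite_eq_filter, List.nil_append]
    apply List.filter_congr
    intro g hg
    have hrange := (PySem.List.mem_pyRange_one).1 hg
    have hn : 0 < n := by omega
    have hmod : PySem.Int.mod g n = g := by
      rw [PySem.Int.mod_eq_emod_of_pos hn]
      exact Int.emod_eq_of_lt (by omega) (by omega)
    have hgnz : PySem.Int.mod g n ≠ 0 := by omega
    have hbad : (PySem.Set.contains (badSet n base) g = true) ↔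
        ∃ r ∈ PySem.List.pyRange 1 n 1, Collides n base g r := by
      rw [PySem.Set.contains_iff, mem_badSet]
      constructor
      · rintro ⟨r, hr, _, hcoll⟩; exact ⟨r, hr, hcoll⟩
      · rintro ⟨r, hr, hcoll⟩; exact ⟨r, hr, hg, hcoll⟩
    rw [Bool.eq_iff_iff]
    simp only [decide_eq_true_eq, Bool.and_eq_true, beq_iff_eq, Bool.not_eq_true']
    apply and_congr_right
    intro _
    rw [collisionCount_eq_zero n g base hgnz, Bool.eq_false_iff, Ne, hbad]
    push Not
    rfl
  · intro g _ acc
    by_cases h1 : pyGcd g n = 1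
    · by_cases h2 : collisionCount n g base = 0 <;> simp [h1, h2]
    · simp [h1]
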